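-- pv_equiv track=rewrite | github.com/shawnxiao-yara/radix-co2-reduction | src/co2_reduction/cover_crop_detection/labels.py | combine_hdbscan
-- ===== SOURCE A (Python) =====
-- from typing import List, Optional
--
-- def combine_hdbscan(
--     known_labels: List[Optional[bool]],
--     clusters: List[int],
-- ) -> List[Optional[bool]]:
--     """
--     Update the labels regarding the clusters obtained by the HDBSCAN algorithm.
--
--     Note that:
--      - Non-labeled noisy samples remain to have a None-label
--      - All labeled samples will keep their label, disregarding their cluster
--      - Unlabeled samples in conflicting clusters (clusters that contain both True and False samples) are not labeled
--
--     :param known_labels: Known labels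
--     :param clusters: predicted clusters
--     """
--     labels: List[Optional[bool]] = [None] * len(known_labels)
--
--     # Add labels regarding cluster
--     clustered = {
--         c_id: list(
--             {l for c, l in zip(clusters, known_labels) if isinstance(l, bool) and (c == c_id)}
--         )
--         for c_id in set(clusters)
--     }
--     for c_id, bools in clustered.items():
--         # No label (unknown cluster) or two labels (conflicting cluster) --> ignore
--         if len(bools) != 1:
--             continue
--
--         # Label all IDs in cluster
--         label = bools[0]
--         for i, cluster in enumerate(clusters):
--             if cluster == c_id:
--                 labels[i] = label
--
--     # Overwrite the labels that are known
--     for i in range(len(known_labels)):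
--         if isinstance(known_labels[i], bool):
--             labels[i] = known_labels[i]
--     return labels
-- ===== SOURCE B (Python) =====
-- from typing import List, Optional
--
-- def combine_hdbscan(
--     known_labels: List[Optional[bool]],
--     clusters: List[int],
-- ) -> List[Optional[bool]]:
--     # One pass over the data collecting, per cluster, its unanimous known label
--     # (None once the cluster is conflicting), then one assignment pass.
--     vote = {}  # cluster -> unanimous bool, or None once conflicting
--     for c, l in zip(clusters, known_labels):
--         if isinstance(l, bool):
--             if c not in vote:
--                 vote[c] = l
--             elif vote[c] is not l:
--                 vote[c] = None
--     out: List[Optional[bool]] = []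
--     for i, l in enumerate(known_labels):
--         if isinstance(l, bool):
--             out.append(l)
--         elif i < len(clusters) and vote.get(clusters[i]) is not None:
--             out.append(vote[clusters[i]])
--         else:
--             out.append(None)
--     return out
-- ===== Notes on version B (the rewrite author's own statement) =====
-- stated objective: faster
-- what changed: A builds, for every distinct cluster id, its label set by a full scan over the zipped data and then rescans all of clusters to assign (O(C*N)); B makes one pass over the zipped data maintaining a dict cluster -> unanimous label (None once conflicting) and then one assignment pass over the indices (O(N)).
import Mathlib
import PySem

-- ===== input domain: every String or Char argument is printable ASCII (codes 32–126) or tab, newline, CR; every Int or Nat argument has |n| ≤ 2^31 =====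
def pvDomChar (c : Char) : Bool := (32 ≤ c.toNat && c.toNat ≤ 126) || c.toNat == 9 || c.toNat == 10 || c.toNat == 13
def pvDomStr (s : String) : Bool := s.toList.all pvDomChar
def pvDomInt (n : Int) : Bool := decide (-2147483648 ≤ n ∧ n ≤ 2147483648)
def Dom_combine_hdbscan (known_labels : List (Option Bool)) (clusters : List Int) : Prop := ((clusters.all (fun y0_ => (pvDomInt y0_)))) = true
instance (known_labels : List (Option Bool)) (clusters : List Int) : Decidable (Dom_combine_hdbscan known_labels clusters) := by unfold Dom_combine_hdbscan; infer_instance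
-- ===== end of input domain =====

-- B propagates labels through non-conflicting clusters in one grouping pass plus one
-- assignment pass (dict cluster -> unanimous label) instead of A's per-cluster rescans.

-- ===== PORT A =====
-- for i, cluster in enumerate(clusters): if cluster == c_id: labels[i] = label
-- (enumerate indices are ≥ 0, so .toNat is exact; labels[i] with i ≥ len(labels)
--  raises IndexError in Python — excluded by Pre_ —, here List.set ignores it)
def pvClusterAssign (clusters : List Int) (c_id : Int) (label : Bool) (labs : List (Option Bool)) : List (Option Bool) :=
  (PySem.List.enumerate clusters).foldl
    (fun labs p => if p.2 == c_id then labs.set p.1.toNat (some label) else labs) labs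

-- body of 'for c_id, bools in clustered.items()': skip unless len(bools) == 1
def pvOuterStep (clusters : List Int) (labs : List (Option Bool)) (q : Int × List Bool) : List (Option Bool) :=
  match q.2 with
  | [label] => pvClusterAssign clusters q.1 label labs
  | _ => labs

-- body of 'for i in range(len(known_labels)): if isinstance(known_labels[i], bool): labels[i] = known_labels[i]'
def pvWriteKnown (known_labels : List (Option Bool)) (labs : List (Option Bool)) (j : Int) : List (Option Bool) :=
  match PySem.List.pyGetD known_labels j none with
  | some b => labs.set j.toNat (some b)
  | none => labs

def combine_hdbscan (known_labels : List (Option Bool)) (clusters : List Int) : List (Option Bool) :=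
  -- labels = [None] * len(known_labels)
  let labels : List (Option Bool) := List.replicate known_labels.length none
  -- clustered = {c_id: list({l for c, l in zip(clusters, known_labels) if isinstance(l, bool) and c == c_id}) for c_id in set(clusters)}
  -- (each per-cluster set is consumed only via len == 1 and its single element, and the
  --  per-key loops touch disjoint index sets, so set/dict iteration order cannot affect
  --  the result; ported in first-occurrence order)
  let clustered : PySem.Dict Int (List Bool) :=
    PySem.Dict.mk ((PySem.Set.ofList clusters).map (fun c_id =>
      (c_id, ((PySem.Set.ofList ((clusters.zip known_labels).filterMap
                (fun p => if p.1 == c_id then p.2 else none))) : List Bool))))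
  -- for c_id, bools in clustered.items(): ...
  let labels := clustered.items.foldl (pvOuterStep clusters) labels
  -- for i in range(len(known_labels)): ...
  (PySem.List.pyRange 0 (known_labels.length : Int) 1).foldl (pvWriteKnown known_labels) labels

-- ===== PORT B =====
-- body of the grouping pass: if isinstance(l, bool): if c not in vote: vote[c] = l
--                            elif vote[c] is not l: vote[c] = None
def pvVoteStep (d : PySem.Dict Int (Option Bool)) (p : Int × Option Bool) : PySem.Dict Int (Option Bool) :=
  match p.2 with
  | some b =>
      match d.get? p.1 with
      | none => d.insert p.1 (some b)
      | some v => if v ≠ some b then d.insert p.1 none else d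
  | none => d

def combine_hdbscan_alt (known_labels : List (Option Bool)) (clusters : List Int) : List (Option Bool) :=
  -- vote = {}; for c, l in zip(clusters, known_labels): ...
  let vote : PySem.Dict Int (Option Bool) :=
    (clusters.zip known_labels).foldl pvVoteStep PySem.Dict.empty
  -- out = []; for i, l in enumerate(known_labels): ...
  (PySem.List.enumerate known_labels).map (fun p =>
    match p.2 with
    | some b => some b
    | none =>
        if p.1 < (clusters.length : Int) then vote.getD (PySem.List.pyGetD clusters p.1 0) none
        else none)

-- ===== PRECONDITION & SPEC =====
-- clusterHasLabel known_labels clusters c b : some sample of cluster c carries the known label b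
def clusterHasLabel (known_labels : List (Option Bool)) (clusters : List Int) (c : Int) (b : Bool) : Bool :=
  (clusters.zip known_labels).any (fun p => p.1 == c && p.2 == some b)

-- Pre_ excludes exactly the inputs on which Python A raises IndexError: clusters longer than
-- known_labels with a unanimously-labelled cluster occurring at an index ≥ len(known_labels).
def Pre_combine_hdbscan (known_labels : List (Option Bool)) (clusters : List Int) : Prop :=
  ((clusters.drop known_labels.length).all (fun c =>
    clusterHasLabel known_labels clusters c true == clusterHasLabel known_labels clusters c false)) = true
instance (known_labels : List (Option Bool)) (clusters : List Int) : Decidable (Pre_combine_hdbscan known_labels clusters) := by unfold Pre_combine_hdbscan; infer_instance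

def pvWitness_combine_hdbscan : List (Option Bool) × List Int := ([some true, none, none], [0, 0, 1])

def Spec_combine_hdbscan (known_labels : List (Option Bool)) (clusters : List Int) (out : List (Option Bool)) : Prop := out = combine_hdbscan_alt known_labels clusters
instance (known_labels : List (Option Bool)) (clusters : List Int) (out : List (Option Bool)) : Decidable (Spec_combine_hdbscan known_labels clusters out) := by unfold Spec_combine_hdbscan; infer_instance

-- ===== CLAIM (what is proved, stated in full; the proofs are below) =====
def Claim_equal_combine_hdbscan : Prop := ∀ (known_labels : List (Option Bool)) (clusters : List Int), Dom_combine_hdbscan known_labels clusters → Pre_combine_hdbscan known_labels clusters → Spec_combine_hdbscan known_labels clusters (combine_hdbscan known_labels clusters)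

-- ===== LEMMAS AND PROOFS =====

-- the labels (in order) that cluster c carries in the zipped data
def pvLabelsOf (known_labels : List (Option Bool)) (clusters : List Int) (c : Int) : List Bool :=
  (clusters.zip known_labels).filterMap (fun p => if p.1 == c then p.2 else none)

-- the label both programs propagate through cluster c (none: no label or conflicting)
def pvClusterVal (known_labels : List (Option Bool)) (clusters : List Int) (c : Int) : Option Bool :=
  match pvLabelsOf known_labels clusters c with
  | [] => none
  | b :: bs => if (!b) ∈ bs then none else some b

-- the common per-index output value
def pvSpecAt (known_labels : List (Option Bool)) (clusters : List Int) (i : Nat) : Option Bool :=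
  match known_labels.getD i none with
  | some b => some b
  | none => if i < clusters.length then pvClusterVal known_labels clusters (clusters.getD i 0) else none

-- the evolution of vote.get?, as a pure function of the labels seen so far
def pvMerge (v : Option (Option Bool)) : List Bool → Option (Option Bool)
  | [] => v
  | b :: bs => pvMerge (some (match v with | none => some b | some w => if w ≠ some b then none else w)) bs

theorem pvFoldl_length {β : Type} (f : List (Option Bool) → β → List (Option Bool))
    (h : ∀ labs x, (f labs x).length = labs.length) (l : List β) (labs : List (Option Bool)) :
    (l.foldl f labs).length = labs.length := by
  induction l generalizing labs with
  | nil => rfl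
  | cons x l ih => rw [List.foldl_cons, ih, h]

theorem pvMerge_some_some (bs : List Bool) (w : Bool) :
    pvMerge (some (some w)) bs = some (if (!w) ∈ bs then none else some w) := by
  induction bs generalizing w with
  | nil => simp [pvMerge]
  | cons b bs ih =>
    by_cases hb : w = b
    · subst hb
      simp [pvMerge, ih]
    · have hbw : b = !w := by cases w <;> cases b <;> simp_all
      subst hbw
      have : ∀ bs', pvMerge (some none) bs' = some none := by
        intro bs'; induction bs' with
        | nil => rfl
        | cons x xs ih2 => simpa [pvMerge] using ih2
      simp [pvMerge, this]

theorem pvVote_get? (ps : List (Int × Option Bool)) (d : PySem.Dict Int (Option Bool)) (c : Int) :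
    (ps.foldl pvVoteStep d).get? c
      = pvMerge (d.get? c) (ps.filterMap (fun p => if p.1 == c then p.2 else none)) := by
  induction ps generalizing d with
  | nil => rfl
  | cons p ps ih =>
    obtain ⟨c', l⟩ := p
    cases l with
    | none => simpa [pvVoteStep] using ih d
    | some b =>
      by_cases hc : c' = c
      · subst hc
        rw [List.foldl_cons, ih]
        cases hg : d.get? c' with
        | none =>
          simp [pvVoteStep, hg, pvMerge, PySem.Dict.get?_insert_self]
        | some v =>
          by_cases hv : v = some b
          · subst hv; simp [pvVoteStep, hg, pvMerge]
          · simp [pvVoteStep, hg, hv, pvMerge, PySem.Dict.get?_insert_self]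
      · rw [List.foldl_cons, ih]
        have hstep : (pvVoteStep d (c', some b)).get? c = d.get? c := by
          unfold pvVoteStep
          cases hg : d.get? c' with
          | none => exact PySem.Dict.get?_insert_of_ne d _ (Ne.symm hc)
          | some v =>
            by_cases hv : v = some b
            · simp [hv]
            · simpa [hv] using PySem.Dict.get?_insert_of_ne d _ (Ne.symm hc)
        rw [hstep]
        congr 1
        rw [List.filterMap_cons]
        simp [hc]

theorem pvVote_getD (known_labels : List (Option Bool)) (clusters : List Int) (c : Int) :
    (((clusters.zip known_labels).foldl pvVoteStep PySem.Dict.empty).getD c none)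
      = pvClusterVal known_labels clusters c := by
  rw [PySem.Dict.getD_eq_get?_getD, pvVote_get?, PySem.Dict.get?_empty]
  unfold pvClusterVal
  rw [show (clusters.zip known_labels).filterMap (fun p => if p.1 == c then p.2 else none)
      = pvLabelsOf known_labels clusters c from rfl]
  cases h : pvLabelsOf known_labels clusters c with
  | nil => simp [pvMerge]
  | cons b bs => simp [pvMerge, pvMerge_some_some]

theorem pvAlt_getElem? (known_labels : List (Option Bool)) (clusters : List Int) (i : Nat)
    (hi : i < known_labels.length) :
    (combine_hdbscan_alt known_labels clusters)[i]? = some (pvSpecAt known_labels clusters i) := by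
  unfold combine_hdbscan_alt
  rw [List.getElem?_map, PySem.List.getElem?_enumerate, List.getElem?_eq_getElem hi]
  unfold pvSpecAt
  rw [List.getD_eq_getElem?_getD, List.getElem?_eq_getElem hi]
  cases hk : known_labels[i] with
  | some b => simp
  | none =>
    simp only [Option.map_some, Option.getD_some, zero_add]
    by_cases hcl : i < clusters.length
    · rw [if_pos (by exact_mod_cast hcl), if_pos hcl, PySem.List.pyGetD_natCast, pvVote_getD]
    · rw [if_neg (by exact_mod_cast hcl), if_neg hcl]

theorem pvAlt_length (known_labels : List (Option Bool)) (clusters : List Int) :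
    (combine_hdbscan_alt known_labels clusters).length = known_labels.length := by
  unfold combine_hdbscan_alt
  rw [List.length_map, PySem.List.length_enumerate]

theorem pvInner_getElem? (l : List (Int × Int)) (c : Int) (b : Bool) (labs : List (Option Bool)) (i : Nat) :
    (l.foldl (fun labs p => if p.2 == c then labs.set p.1.toNat (some b) else labs) labs)[i]?
      = if (∃ p ∈ l, p.2 = c ∧ p.1.toNat = i) ∧ i < labs.length then some (some b) else labs[i]? := by
  induction l generalizing labs with
  | nil => simp
  | cons p l ih =>
    rw [List.foldl_cons]
    by_cases hpc : p.2 = c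
    · rw [if_pos (by simpa using hpc), ih]
      rw [List.length_set]
      by_cases hki : p.1.toNat = i
      · by_cases hlen : i < labs.length
        · by_cases hex : ∃ q ∈ l, q.2 = c ∧ q.1.toNat = i
          · simp [hex, hlen, hpc, hki]
          · simp [hex, hlen, hpc, hki, List.getElem?_set]
        · simp [hlen, List.getElem?_set, hki]
      · by_cases hex : ∃ q ∈ l, q.2 = c ∧ q.1.toNat = i
        · by_cases hlen : i < labs.length <;> simp [hex, hlen, hpc, hki, List.getElem?_set]
        · by_cases hlen : i < labs.length <;>
            simp [hex, hlen, hpc, hki, List.getElem?_set, Ne.symm hki]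
    · rw [if_neg (by simpa using hpc), ih]
      by_cases hex : (∃ q ∈ l, q.2 = c ∧ q.1.toNat = i) <;>
        by_cases hlen : i < labs.length <;>
          simp [hex, hlen, hpc]

theorem pvEx_enum_iff (clusters : List Int) (c : Int) (i : Nat) :
    (∃ p ∈ PySem.List.enumerate clusters, p.2 = c ∧ p.1.toNat = i)
      ↔ (i < clusters.length ∧ clusters.getD i 0 = c) := by
  constructor
  · rintro ⟨p, hp, h2, h1⟩
    rw [PySem.List.mem_enumerate_iff] at hp
    obtain ⟨k, hk, rfl⟩ := hp
    simp only [zero_add, Int.toNat_natCast] at h1 h2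
    subst h1
    exact ⟨hk, by rw [List.getD_eq_getElem?_getD, List.getElem?_eq_getElem hk]; exact h2⟩
  · rintro ⟨hi, hc⟩
    refine ⟨((i : Int), c), ?_, rfl, by simp⟩
    rw [PySem.List.mem_enumerate_iff]
    refine ⟨i, hi, ?_⟩
    rw [List.getD_eq_getElem?_getD, List.getElem?_eq_getElem hi] at hc
    simp only [Option.getD_some] at hc
    simp [hc]

theorem pvClusterAssign_length (clusters : List Int) (c : Int) (b : Bool) (labs : List (Option Bool)) :
    (pvClusterAssign clusters c b labs).length = labs.length := by
  unfold pvClusterAssign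
  apply pvFoldl_length
  intro labs p
  by_cases h : p.2 == c <;> simp [h]

theorem pvOuterStep_length (clusters : List Int) (labs : List (Option Bool)) (q : Int × List Bool) :
    (pvOuterStep clusters labs q).length = labs.length := by
  unfold pvOuterStep
  rcases q with ⟨c, bs⟩
  match bs with
  | [] => rfl
  | [b] => exact pvClusterAssign_length clusters c b labs
  | b :: b' :: rest => rfl

theorem pvOuterStep_getElem?_of_not (clusters : List Int) (labs : List (Option Bool)) (i : Nat)
    (q : Int × List Bool)
    (h : ∀ b, q.2 = [b] → ¬(i < clusters.length ∧ clusters.getD i 0 = q.1)) :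
    (pvOuterStep clusters labs q)[i]? = labs[i]? := by
  unfold pvOuterStep
  rcases q with ⟨c, bs⟩
  match bs with
  | [] => rfl
  | [b] =>
    show (pvClusterAssign clusters c b labs)[i]? = labs[i]?
    unfold pvClusterAssign
    rw [pvInner_getElem?,
      if_neg (fun hh => h b rfl ⟨((pvEx_enum_iff clusters c i).1 hh.1).1,
        ((pvEx_enum_iff clusters c i).1 hh.1).2⟩)]
  | b :: b' :: rest => rfl

theorem pvOuter_no_write (clusters : List Int) (items : List (Int × List Bool))
    (labs : List (Option Bool)) (i : Nat)
    (h : ∀ q ∈ items, ∀ b, q.2 = [b] → ¬(i < clusters.length ∧ clusters.getD i 0 = q.1)) :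
    (items.foldl (pvOuterStep clusters) labs)[i]? = labs[i]? := by
  induction items generalizing labs with
  | nil => rfl
  | cons q items ih =>
    rw [List.foldl_cons, ih _ (fun q' hq' => h q' (List.mem_cons_of_mem _ hq')),
        pvOuterStep_getElem?_of_not clusters labs i q (h q List.mem_cons_self)]

theorem pvOuter_write (clusters : List Int) (items : List (Int × List Bool))
    (labs : List (Option Bool)) (i : Nat) (c : Int) (b : Bool)
    (hnd : (items.map Prod.fst).Nodup) (hmem : (c, [b]) ∈ items)
    (hi : i < clusters.length) (hc : clusters.getD i 0 = c) (hlen : i < labs.length) :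
    (items.foldl (pvOuterStep clusters) labs)[i]? = some (some b) := by
  induction items generalizing labs with
  | nil => cases hmem
  | cons q items ih =>
    rw [List.map_cons, List.nodup_cons] at hnd
    rcases List.mem_cons.1 hmem with hq | hq
    · have hq1 : q = (c, [b]) := hq.symm
      subst hq1
      rw [List.foldl_cons]
      have hrest : ∀ q' ∈ items, ∀ b', q'.2 = [b'] → ¬(i < clusters.length ∧ clusters.getD i 0 = q'.1) := by
        intro q' hq' b' _ hcon
        have hq'c : q'.1 = c := by rw [← hcon.2, hc]
        exact hnd.1 (show (c, [b]).1 ∈ items.map Prod.fst by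
          rw [show ((c, [b]).1 : Int) = c from rfl, ← hq'c]
          exact List.mem_map.2 ⟨q', hq', rfl⟩)
      rw [pvOuter_no_write clusters items _ i hrest]
      show (pvOuterStep clusters labs (c, [b]))[i]? = some (some b)
      show (pvClusterAssign clusters c b labs)[i]? = some (some b)
      unfold pvClusterAssign
      rw [pvInner_getElem?, if_pos ⟨(pvEx_enum_iff clusters c i).2 ⟨hi, hc⟩, hlen⟩]
    · rw [List.foldl_cons]
      exact ih _ hnd.2 hq (by rw [pvOuterStep_length]; exact hlen)

theorem pvOfList_singleton (bs : List Bool) (b : Bool) (hne : bs ≠ []) (hall : ∀ x ∈ bs, x = b) :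
    PySem.Set.ofList bs = [b] := by
  match bs with
  | [] => exact absurd rfl hne
  | x :: rest =>
    have hx : x = b := hall x List.mem_cons_self
    subst hx
    rw [PySem.Set.ofList_eq_foldl, List.foldl_cons]
    have h0 : PySem.Set.add ([] : PySem.Set Bool) x = [x] := by rfl
    rw [h0]
    have : ∀ (l : List Bool), (∀ y ∈ l, y = x) → l.foldl PySem.Set.add [x] = [x] := by
      intro l
      induction l with
      | nil => intro _; rfl
      | cons y l ih =>
        intro hl
        have hy : y = x := hl y List.mem_cons_self
        subst hy
        rw [List.foldl_cons, show PySem.Set.add [y] y = [y] by simp [PySem.Set.add, PySem.Set.contains]]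
        exact ih (fun z hz => hl z (List.mem_cons_of_mem _ hz))
    exact this rest (fun z hz => hall z (List.mem_cons_of_mem _ hz))

theorem pvClusterVal_eq_some_iff (known_labels : List (Option Bool)) (clusters : List Int) (c : Int) (b : Bool) :
    pvClusterVal known_labels clusters c = some b
      ↔ PySem.Set.ofList (pvLabelsOf known_labels clusters c) = [b] := by
  unfold pvClusterVal
  cases h : pvLabelsOf known_labels clusters c with
  | nil =>
    simp only [PySem.Set.ofList]
    constructor
    · intro hc; cases hc
    · intro hc; cases hc
  | cons b0 bs =>
    constructor
    · intro hc
      by_cases hb : (!b0) ∈ bs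
      · simp [hb] at hc
      · simp only [hb, if_false] at hc
        have hb0 : b0 = b := by simpa using hc
        subst hb0
        apply pvOfList_singleton _ _ (by simp)
        intro x hx
        rcases List.mem_cons.1 hx with rfl | hx
        · rfl
        · by_contra hxb
          have : x = !b0 := by cases x <;> cases b0 <;> simp_all
          exact hb (this ▸ hx)
    · intro hc
      have hmem : ∀ y, y ∈ (b0 :: bs) ↔ y ∈ ([b] : List Bool) := by
        intro y
        rw [← hc, PySem.Set.mem_ofList]
      have hb0 : b0 = b := by have := (hmem b0).1 List.mem_cons_self; simpa using this
      subst hb0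
      have hnb : (!b0) ∉ bs := by
        intro hx
        have := (hmem (!b0)).1 (List.mem_cons_of_mem _ hx)
        simp at this
      simp [hnb]

theorem pvWriteKnown_length (known_labels : List (Option Bool)) (labs : List (Option Bool)) (j : Int) :
    (pvWriteKnown known_labels labs j).length = labs.length := by
  unfold pvWriteKnown
  cases PySem.List.pyGetD known_labels j none <;> simp

theorem pvFinal_getElem? (known_labels : List (Option Bool)) (m : Nat) (labs : List (Option Bool))
    (i : Nat) (hi : i < labs.length) :
    ((PySem.List.pyRange 0 (m : Int) 1).foldl (pvWriteKnown known_labels) labs)[i]?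
      = if i < m then (match known_labels.getD i none with
                       | some b => some (some b)
                       | none => labs[i]?)
        else labs[i]? := by
  induction m generalizing labs with
  | zero => simp [PySem.List.pyRange]
  | succ m ih =>
    rw [show ((m + 1 : Nat) : Int) = (m : Int) + 1 by push_cast; ring,
        PySem.List.pyRange_one_succ_right (by positivity), List.foldl_append]
    have hlen : (List.foldl (pvWriteKnown known_labels) labs (PySem.List.pyRange 0 (m : Int) 1)).length = labs.length :=
      pvFoldl_length _ (pvWriteKnown_length known_labels) _ labs
    rw [List.foldl_cons, List.foldl_nil]
    have happly : ∀ labs', pvWriteKnown known_labels labs' ((m : Nat) : Int)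
        = match known_labels.getD m none with
          | some b => labs'.set m (some b)
          | none => labs' := by
      intro labs'
      unfold pvWriteKnown
      rw [PySem.List.pyGetD_natCast, Int.toNat_natCast]
    rw [happly]
    cases hk : known_labels.getD m none with
    | some b =>
      simp only []
      rw [List.getElem?_set]
      by_cases him : i = m
      · subst him
        rw [if_pos rfl, hlen, if_pos hi, if_pos (Nat.lt_succ_self _), hk]
      · rw [if_neg (fun hh => him hh.symm), ih labs hi]
        by_cases hlt : i < m
        · rw [if_pos hlt, if_pos (by omega)]
        · rw [if_neg hlt, if_neg (by omega)]
    | none =>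
      simp only []
      rw [ih labs hi]
      by_cases hlt : i < m
      · rw [if_pos hlt, if_pos (by omega)]
      · rw [if_neg hlt]
        by_cases him : i = m
        · subst him
          rw [if_pos (by omega), hk]
        · rw [if_neg (by omega)]

theorem pvA_length (known_labels : List (Option Bool)) (clusters : List Int) :
    (combine_hdbscan known_labels clusters).length = known_labels.length := by
  show (List.foldl (pvWriteKnown known_labels)
      (List.foldl (pvOuterStep clusters) (List.replicate known_labels.length none) _)
      (PySem.List.pyRange 0 (known_labels.length : Int) 1)).length = known_labels.length
  rw [pvFoldl_length _ (pvWriteKnown_length known_labels),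
      pvFoldl_length _ (pvOuterStep_length clusters), List.length_replicate]

theorem pvA_getElem? (known_labels : List (Option Bool)) (clusters : List Int) (i : Nat)
    (hi : i < known_labels.length) :
    (combine_hdbscan known_labels clusters)[i]? = some (pvSpecAt known_labels clusters i) := by
  unfold combine_hdbscan
  set L : List (Int × List Bool) := (PySem.Set.ofList clusters).map (fun c_id =>
      (c_id, ((PySem.Set.ofList ((clusters.zip known_labels).filterMap
                (fun p => if p.1 == c_id then p.2 else none))) : List Bool))) with hL
  show (List.foldl (pvWriteKnown known_labels)
      (List.foldl (pvOuterStep clusters) (List.replicate known_labels.length none) L)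
      (PySem.List.pyRange 0 (known_labels.length : Int) 1))[i]?
    = some (pvSpecAt known_labels clusters i)
  have hlen1 : (L.foldl (pvOuterStep clusters) (List.replicate known_labels.length none)).length
      = known_labels.length := by
    rw [pvFoldl_length _ (pvOuterStep_length clusters), List.length_replicate]
  rw [pvFinal_getElem? known_labels known_labels.length _ i (by rw [hlen1]; exact hi)]
  rw [if_pos hi]
  unfold pvSpecAt
  cases hk : known_labels.getD i none with
  | some b => rfl
  | none =>
    simp only []
    have hndL : (L.map Prod.fst).Nodup := by
      rw [hL, List.map_map]
      have : (Prod.fst ∘ fun c_id => ((c_id : Int),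
          ((PySem.Set.ofList ((clusters.zip known_labels).filterMap
            (fun p => if p.1 == c_id then p.2 else none))) : List Bool))) = id := rfl
      rw [this, List.map_id]
      exact PySem.Set.nodup_ofList clusters
    by_cases hcl : i < clusters.length
    · rw [if_pos hcl]
      set c : Int := clusters.getD i 0 with hcdef
      cases hv : pvClusterVal known_labels clusters c with
      | some b =>
        have hmemL : (c, [b]) ∈ L := by
          rw [hL]
          apply List.mem_map.2
          refine ⟨c, ?_, ?_⟩
          · rw [PySem.Set.mem_ofList]
            have : clusters[i] = c := by
              rw [hcdef, List.getD_eq_getElem?_getD, List.getElem?_eq_getElem hcl]; rfl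
            exact this ▸ List.getElem_mem hcl
          · have := (pvClusterVal_eq_some_iff known_labels clusters c b).1 hv
            unfold pvLabelsOf at this
            rw [this]
        rw [pvOuter_write clusters L _ i c b hndL hmemL hcl rfl
          (by rw [List.length_replicate]; exact hi)]
      | none =>
        have hnw : ∀ q ∈ L, ∀ b, q.2 = [b] → ¬(i < clusters.length ∧ clusters.getD i 0 = q.1) := by
          intro q hq b hqb hcon
          obtain ⟨c', _, rfl⟩ := List.mem_map.1 (hL ▸ hq)
          simp only [] at hqb hcon
          have hc' : c' = c := by rw [← hcon.2, hcdef]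
          subst hc'
          have : pvClusterVal known_labels clusters c = some b :=
            (pvClusterVal_eq_some_iff known_labels clusters c b).2 (by unfold pvLabelsOf; exact hqb)
          rw [hv] at this
          cases this
        rw [pvOuter_no_write clusters L _ i hnw, List.getElem?_replicate, if_pos hi]
    · rw [if_neg hcl]
      have hnw : ∀ q ∈ L, ∀ b, q.2 = [b] → ¬(i < clusters.length ∧ clusters.getD i 0 = q.1) :=
        fun q _ b _ hcon => hcl hcon.1
      rw [pvOuter_no_write clusters L _ i hnw, List.getElem?_replicate, if_pos hi]

-- ===== VERDICT (by name: the statement is the Claim_ definition above) =====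
theorem combine_hdbscan_spec : Claim_equal_combine_hdbscan := by
  intro kl cl _ _
  unfold Spec_combine_hdbscan
  apply List.ext_getElem?
  intro i
  by_cases hi : i < kl.length
  · rw [pvA_getElem? kl cl i hi, pvAlt_getElem? kl cl i hi]
  · rw [List.getElem?_eq_none (by rw [pvA_length]; omega),
        List.getElem?_eq_none (by rw [pvAlt_length]; omega)]
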